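-- pv_equiv track=rewrite | github.com/andrey-yemelyanov/competitive-programming | cp-book/ch2/lineards/_1darraymanip/_10978_LetsPlayMagic.py | arrange_cards
-- ===== SOURCE A (Python) =====
-- EMPTY = ""
--
-- def arrange_cards(ordering):
-- 	arrangement = [EMPTY] * len(ordering)
-- 	pos = -1
-- 	for card, n_steps in ordering:
-- 		next_pos = empty_slot(arrangement, pos, n_steps)
-- 		arrangement[next_pos] = card
-- 		pos = next_pos
-- 	return arrangement
--
-- def empty_slot(arrangement, start_pos, n_steps):
-- 	pos = start_pos
-- 	dist = 0
-- 	while dist < n_steps: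
-- 		pos = (pos + 1) % len(arrangement)
-- 		if arrangement[pos] == EMPTY:
-- 			dist += 1
-- 	return pos
-- ===== SOURCE B (Python) =====
-- EMPTY = ""
--
-- def arrange_cards(ordering):
--     # Each card's slot is found arithmetically: the rank of the current position
--     # among the empty slots plus (n_steps - 1), modulo the number of empty slots.
--     # Nonpositive step counts advance nowhere.
--     n = len(ordering)
--     arrangement = [EMPTY] * n
--     pos = -1
--     for card, k in ordering:
--         if k > 0:
--             empties = [i for i in range(n) if arrangement[i] == EMPTY]
--             r = sum(1 for i in empties if i <= pos)
--             pos = empties[(r + k - 1) % len(empties)]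
--         arrangement[pos] = card
--     return arrangement
-- ===== Notes on version B (the rewrite author's own statement) =====
-- stated objective: faster
-- what changed: B computes each card's slot arithmetically - the rank of the current position among the empty slots plus (n_steps-1) modulo the number of empty slots - instead of simulating A's step-by-step circular walk, so a placement costs O(n) regardless of n_steps.
import Mathlib
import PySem

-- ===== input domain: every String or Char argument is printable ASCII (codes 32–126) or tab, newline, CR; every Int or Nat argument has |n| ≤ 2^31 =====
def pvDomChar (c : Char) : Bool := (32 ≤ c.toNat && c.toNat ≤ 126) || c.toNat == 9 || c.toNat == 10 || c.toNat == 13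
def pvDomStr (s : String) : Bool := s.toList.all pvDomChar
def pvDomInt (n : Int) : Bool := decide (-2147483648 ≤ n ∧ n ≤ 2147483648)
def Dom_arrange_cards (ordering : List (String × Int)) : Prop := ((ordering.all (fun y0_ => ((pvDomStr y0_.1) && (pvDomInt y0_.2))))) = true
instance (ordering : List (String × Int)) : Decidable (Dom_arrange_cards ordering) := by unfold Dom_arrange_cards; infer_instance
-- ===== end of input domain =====

-- B replaces A's step-by-step circular walk by a rank + modular-index selection from the
-- sorted list of currently empty slots, making each placement's cost independent of n_steps.

-- ===== PORT A =====
-- while dist < n_steps: pos = (pos+1) % len(arrangement); if arrangement[pos] == EMPTY: dist += 1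
-- fuel only bounds the number of while-iterations (totality guard); it is ample on every
-- input where the Python loop terminates, and the loop body is A's verbatim body.
def emptySlotLoop (arr : List String) (k : Int) : Nat → Int → Int → Int
  | 0, pos, _ => pos
  | fuel+1, pos, dist =>
    if dist < k then
      let pos' := PySem.Int.mod (pos + 1) (arr.length : Int)
      if PySem.List.pyGetD arr pos' "?" == "" then
        emptySlotLoop arr k fuel pos' (dist + 1)
      else
        emptySlotLoop arr k fuel pos' dist
    else pos

def empty_slot (arrangement : List String) (start_pos n_steps : Int) : Int :=
  emptySlotLoop arrangement n_steps
    (n_steps.toNat * arrangement.length + arrangement.length + 1) start_pos 0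

def arrange_cards (ordering : List (String × Int)) : List String :=
  (ordering.foldl
    (fun st ck =>
      let next_pos := empty_slot st.1 st.2 ck.2
      (PySem.List.pySetD st.1 next_pos ck.1, next_pos))
    (List.replicate ordering.length "", -1)).1

-- ===== PORT B =====
def arrange_cards_alt (ordering : List (String × Int)) : List String :=
  let n : Int := (ordering.length : Int)
  (ordering.foldl
    (fun st ck =>
      let pos :=
        if 0 < ck.2 then
          let empties := (PySem.List.pyRange 0 n 1).filter
            (fun i => PySem.List.pyGetD st.1 i "?" == "")
          let r : Int := ((empties.filter (fun i => decide (i ≤ st.2))).length : Int)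
          PySem.List.pyGetD empties
            (PySem.Int.mod (r + ck.2 - 1) (empties.length : Int)) 0
        else st.2
      (PySem.List.pySetD st.1 pos ck.1, pos))
    (List.replicate ordering.length "", -1)).1

-- ===== PRECONDITION & SPEC =====
def Spec_arrange_cards (ordering : List (String × Int)) (out : List String) : Prop := out = arrange_cards_alt ordering
instance (ordering : List (String × Int)) (out : List String) : Decidable (Spec_arrange_cards ordering out) := by unfold Spec_arrange_cards; infer_instance

-- ===== CLAIM (what is proved, stated in full; the proofs are below) =====
def Claim_equal_arrange_cards : Prop := ∀ (ordering : List (String × Int)), Dom_arrange_cards ordering → Spec_arrange_cards ordering (arrange_cards ordering)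

-- ===== LEMMAS AND PROOFS =====

-- the two fold bodies, named for the proofs
def stepA : List String × Int → String × Int → List String × Int :=
  fun st ck =>
    let next_pos := empty_slot st.1 st.2 ck.2
    (PySem.List.pySetD st.1 next_pos ck.1, next_pos)

def stepB (n : Int) : List String × Int → String × Int → List String × Int :=
  fun st ck =>
    let pos :=
      if 0 < ck.2 then
        let empties := (PySem.List.pyRange 0 n 1).filter
          (fun i => PySem.List.pyGetD st.1 i "?" == "")
        let r : Int := ((empties.filter (fun i => decide (i ≤ st.2))).length : Int)
        PySem.List.pyGetD empties
          (PySem.Int.mod (r + ck.2 - 1) (empties.length : Int)) 0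
      else st.2
    (PySem.List.pySetD st.1 pos ck.1, pos)

lemma arrange_cards_eq_fold (ordering : List (String × Int)) :
    arrange_cards ordering = (ordering.foldl stepA (List.replicate ordering.length "", -1)).1 := rfl

lemma arrange_cards_alt_eq_fold (ordering : List (String × Int)) :
    arrange_cards_alt ordering
      = (ordering.foldl (stepB (ordering.length : Int)) (List.replicate ordering.length "", -1)).1 := rfl

-- emptiness test and the list of empty slots (B's `empties`, with n = arr.length)
def emptyAt (arr : List String) (i : Int) : Bool := PySem.List.pyGetD arr i "?" == ""

def emptiesOf (arr : List String) : List Int :=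
  (PySem.List.pyRange 0 (arr.length : Int) 1).filter (fun i => PySem.List.pyGetD arr i "?" == "")

def rankOf (arr : List String) (p : Int) : Nat :=
  ((emptiesOf arr).filter (fun i => decide (i ≤ p))).length

lemma mem_emptiesOf (arr : List String) (i : Int) :
    i ∈ emptiesOf arr ↔ 0 ≤ i ∧ i < (arr.length : Int) ∧ emptyAt arr i = true := by
  simp [emptiesOf, List.mem_filter, PySem.List.mem_pyRange_one, emptyAt, and_assoc]

lemma pairwise_emptiesOf (arr : List String) : (emptiesOf arr).Pairwise (· < ·) :=
  List.Pairwise.filter _ (PySem.List.pairwise_lt_pyRange_one 0 (arr.length : Int))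

lemma length_pos_of_emptiesOf_ne_nil {arr : List String} (h : emptiesOf arr ≠ []) :
    0 < arr.length := by
  rcases List.exists_mem_of_ne_nil _ h with ⟨i, hi⟩
  rcases (mem_emptiesOf arr i).1 hi with ⟨h0, h1, _⟩
  omega

lemma loop_exit (arr : List String) (k : Int) (fuel : Nat) (p d : Int) (h : ¬ d < k) :
    emptySlotLoop arr k fuel p d = p := by
  cases fuel <;> simp [emptySlotLoop, h]

lemma filter_eq_takeWhile_of_sorted (p : Int) :
    ∀ (E : List Int), E.Pairwise (· < ·) →
      E.filter (fun i => decide (i ≤ p)) = E.takeWhile (fun i => decide (i ≤ p)) := by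
  intro E hE
  induction E with
  | nil => rfl
  | cons a t ih =>
    rcases List.pairwise_cons.1 hE with ⟨ha, ht⟩
    by_cases hap : a ≤ p
    · simp only [List.filter_cons, List.takeWhile_cons, decide_eq_true hap]
      simpa using ih ht
    · simp only [List.filter_cons, List.takeWhile_cons, decide_eq_false hap]
      rw [if_neg (by simp), if_neg (by simp)]
      refine List.filter_eq_nil_iff.2 ?_
      intro x hx
      have := ha x hx
      simp; omega

-- existence of a minimal positive step landing on an empty slot
lemma exists_min_empty (arr : List String) (p : Int) (hE : emptiesOf arr ≠ []) :
    ∃ t : Nat, 1 ≤ t ∧ t ≤ arr.length ∧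
      emptyAt arr (PySem.Int.mod (p + t) (arr.length : Int)) = true ∧
      ∀ s : Nat, 1 ≤ s → s < t → emptyAt arr (PySem.Int.mod (p + s) (arr.length : Int)) = false := by
  obtain ⟨q, hq⟩ := List.exists_mem_of_ne_nil _ hE
  rcases (mem_emptiesOf arr q).1 hq with ⟨hq0, hq1, hqE⟩
  have hN : (0:Int) < (arr.length : Int) := by omega
  have hNe : (arr.length : Int) ≠ 0 := by omega
  have hmlt : (q - p - 1) % (arr.length : Int) < (arr.length : Int) := Int.emod_lt_of_pos _ hN
  have hm0 : 0 ≤ (q - p - 1) % (arr.length : Int) := Int.emod_nonneg _ hNe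
  have hw : ∃ t : Nat, 1 ≤ t ∧ emptyAt arr (PySem.Int.mod (p + t) (arr.length : Int)) = true := by
    refine ⟨((q - p - 1) % (arr.length : Int)).toNat + 1, by omega, ?_⟩
    unfold emptyAt
    rw [PySem.Int.mod_eq_emod_of_pos hN]
    have harg : (p + ((((q - p - 1) % (arr.length : Int)).toNat + 1 : Nat) : Int))
        = (q - p - 1) % (arr.length : Int) + (p + 1) := by push_cast; omega
    rw [harg, Int.emod_add_emod]
    have : q - p - 1 + (p + 1) = q := by ring
    rw [this, Int.emod_eq_of_lt hq0 hq1]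
    unfold emptyAt at hqE
    exact hqE
  refine ⟨Nat.find hw, (Nat.find_spec hw).1, ?_, (Nat.find_spec hw).2, ?_⟩
  · have := Nat.find_min' hw (m := ((q - p - 1) % (arr.length : Int)).toNat + 1) (⟨by omega, by
      unfold emptyAt
      rw [PySem.Int.mod_eq_emod_of_pos hN]
      have harg : (p + ((((q - p - 1) % (arr.length : Int)).toNat + 1 : Nat) : Int))
          = (q - p - 1) % (arr.length : Int) + (p + 1) := by push_cast; omega
      rw [harg, Int.emod_add_emod]
      have : q - p - 1 + (p + 1) = q := by ring
      rw [this, Int.emod_eq_of_lt hq0 hq1]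
      unfold emptyAt at hqE
      exact hqE⟩ : 1 ≤ _ ∧ _)
    have h2 : (((q - p - 1) % (arr.length : Int)).toNat : Int) = (q - p - 1) % (arr.length : Int) :=
      Int.toNat_of_nonneg hm0
    omega
  · intro s hs1 hs2
    have := Nat.find_min hw hs2
    rw [not_and] at this
    have := this hs1
    simpa using this

-- the slot the walk first lands on, and how the rank advances there
lemma key_first_empty (arr : List String) (p : Int) (t : Nat)
    (hE : emptiesOf arr ≠ [])
    (hp1 : -1 ≤ p) (hp2 : p < (arr.length : Int))
    (ht1 : 1 ≤ t)
    (htE : emptyAt arr (PySem.Int.mod (p + t) (arr.length : Int)) = true)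
    (htmin : ∀ s : Nat, 1 ≤ s → s < t →
      emptyAt arr (PySem.Int.mod (p + s) (arr.length : Int)) = false) :
    PySem.Int.mod (p + t) (arr.length : Int)
        = (emptiesOf arr).getD (rankOf arr p % (emptiesOf arr).length) 0
    ∧ rankOf arr (PySem.Int.mod (p + t) (arr.length : Int))
        = rankOf arr p % (emptiesOf arr).length + 1 := by
  have hn : 0 < arr.length := length_pos_of_emptiesOf_ne_nil hE
  have hN : (0:Int) < (arr.length : Int) := by exact_mod_cast hn
  have hNe : (arr.length : Int) ≠ 0 := by omega
  have hpw := pairwise_emptiesOf arr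
  have hsplit : (emptiesOf arr).takeWhile (fun i => decide (i ≤ p))
      ++ (emptiesOf arr).dropWhile (fun i => decide (i ≤ p)) = emptiesOf arr :=
    List.takeWhile_append_dropWhile
  have hrank : rankOf arr p = ((emptiesOf arr).takeWhile (fun i => decide (i ≤ p))).length := by
    rw [rankOf, filter_eq_takeWhile_of_sorted p _ hpw]
  have htw_le : ∀ x ∈ (emptiesOf arr).takeWhile (fun i => decide (i ≤ p)), x ≤ p :=
    fun x hx => by simpa using List.mem_takeWhile_imp hx
  have hmemE : ∀ x ∈ emptiesOf arr, 0 ≤ x ∧ x < (arr.length : Int) ∧ emptyAt arr x = true :=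
    fun x hx => (mem_emptiesOf arr x).1 hx
  cases hDWc : (emptiesOf arr).dropWhile (fun i => decide (i ≤ p)) with
  | cons Q tl =>
    rw [hDWc] at hsplit
    -- there are empty slots strictly beyond p: the walk stops at the least of them
    have hQp : ¬ Q ≤ p := by
      have h2 : (emptiesOf arr).dropWhile (fun i => decide (i ≤ p)) ≠ [] := by simp [hDWc]
      have hh := List.head_dropWhile_not (p := fun i => decide (i ≤ p)) (l := emptiesOf arr) h2
      have ha : ((emptiesOf arr).dropWhile (fun i => decide (i ≤ p))).head h2 = Q := by
        simp [hDWc]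
      rw [ha] at hh
      simpa using hh
    have hQmemE : Q ∈ emptiesOf arr := by
      rw [← hsplit]; exact List.mem_append_right _ List.mem_cons_self
    have hDWpw : (Q :: tl).Pairwise (· < ·) := by
      have := List.Pairwise.sublist (List.dropWhile_sublist (fun i => decide (i ≤ p))) hpw
      rwa [hDWc] at this
    have htl_gt : ∀ x ∈ tl, Q < x := fun x hx => List.rel_of_pairwise_cons hDWpw hx
    have hQmin : ∀ x ∈ emptiesOf arr, p < x → Q ≤ x := by
      intro x hx hpx
      rw [← hsplit] at hx
      rcases List.mem_append.1 hx with hx | hx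
      · exact absurd (htw_le x hx) (by omega)
      · rcases List.mem_cons.1 hx with rfl | hx
        · exact le_refl _
        · exact le_of_lt (htl_gt x hx)
    rcases hmemE Q hQmemE with ⟨hQ0, hQ1, hQE⟩
    have hlen : (emptiesOf arr).length
        = ((emptiesOf arr).takeWhile (fun i => decide (i ≤ p))).length + (tl.length + 1) := by
      conv_lhs => rw [← hsplit]
      simp
    have hrlt : rankOf arr p < (emptiesOf arr).length := by
      rw [hrank]; omega
    -- the walk's landing slot equals Q
    have ht0 : t ≤ (Q - p).toNat := by
      by_contra hcon
      have h1 : (1:Nat) ≤ (Q - p).toNat := by omega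
      have := htmin (Q - p).toNat h1 (by omega)
      have harg : (p + ((Q - p).toNat : Int)) = Q := by omega
      rw [harg] at this
      rw [PySem.Int.mod_eq_emod_of_pos hN, Int.emod_eq_of_lt hQ0 hQ1] at this
      rw [hQE] at this
      exact Bool.true_eq_false.mp this
    have hq_eq : PySem.Int.mod (p + t) (arr.length : Int) = p + t := by
      rw [PySem.Int.mod_eq_emod_of_pos hN]
      exact Int.emod_eq_of_lt (by omega) (by omega)
    have hqmem : (p + (t:Int)) ∈ emptiesOf arr := by
      rw [mem_emptiesOf]
      refine ⟨by omega, by omega, ?_⟩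
      rw [← hq_eq]; exact htE
    have hqQ : p + (t:Int) = Q := by
      have h1 := hQmin _ hqmem (by omega)
      omega
    have hgetD : (emptiesOf arr).getD (rankOf arr p % (emptiesOf arr).length) 0 = Q := by
      rw [Nat.mod_eq_of_lt hrlt, hrank]
      have h3 := List.getElem?_append_right
        (l₁ := (emptiesOf arr).takeWhile (fun i => decide (i ≤ p))) (l₂ := Q :: tl)
        (i := ((emptiesOf arr).takeWhile (fun i => decide (i ≤ p))).length) (le_refl _)
      rw [hsplit] at h3
      simp only [Nat.sub_self, List.getElem?_cons_zero] at h3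
      simp [List.getD_eq_getElem?_getD, h3]
    have hrankQ : rankOf arr Q
        = ((emptiesOf arr).takeWhile (fun i => decide (i ≤ p))).length + 1 := by
      rw [rankOf]
      conv_lhs => rw [← hsplit]
      rw [List.filter_append]
      have h1 : ((emptiesOf arr).takeWhile (fun i => decide (i ≤ p))).filter
          (fun i => decide (i ≤ Q)) = (emptiesOf arr).takeWhile (fun i => decide (i ≤ p)) := by
        refine List.filter_eq_self.2 ?_
        intro x hx
        have := htw_le x hx
        simp; omega
      have h2 : (Q :: tl).filter (fun i => decide (i ≤ Q)) = [Q] := by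
        simp only [List.filter_cons, decide_eq_true (le_refl Q), if_pos]
        have : tl.filter (fun i => decide (i ≤ Q)) = [] := by
          refine List.filter_eq_nil_iff.2 ?_
          intro x hx
          have := htl_gt x hx
          simp; omega
        simp [this]
      rw [h1, h2]
      simp
    constructor
    · rw [hq_eq, hqQ, hgetD]
    · rw [hq_eq, hqQ, hrankQ, Nat.mod_eq_of_lt hrlt, hrank]
  | nil =>
    -- every empty slot is at or before p: the walk wraps around to the least empty slot
    rw [hDWc, List.append_nil] at hsplit
    have hall : ∀ x ∈ emptiesOf arr, x ≤ p := by
      intro x hx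
      rw [← hsplit] at hx
      exact htw_le x hx
    have hre : rankOf arr p = (emptiesOf arr).length := by
      rw [hrank, hsplit]
    cases hEc : emptiesOf arr with
    | nil => exact absurd hEc hE
    | cons Q tl =>
      have hQmemE : Q ∈ emptiesOf arr := by rw [hEc]; exact List.mem_cons_self
      have hpwQ : (Q :: tl).Pairwise (· < ·) := by rw [← hEc]; exact hpw
      have htl_gt : ∀ x ∈ tl, Q < x := fun x hx => List.rel_of_pairwise_cons hpwQ hx
      have hQmin : ∀ x ∈ emptiesOf arr, Q ≤ x := by
        intro x hx
        rw [hEc] at hx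
        rcases List.mem_cons.1 hx with rfl | hx
        · exact le_refl _
        · exact le_of_lt (htl_gt x hx)
      rcases hmemE Q hQmemE with ⟨hQ0, hQ1, hQE⟩
      have hQp : Q ≤ p := hall Q hQmemE
      have ht0 : t ≤ (Q + (arr.length : Int) - p).toNat := by
        by_contra hcon
        have h1 : (1:Nat) ≤ (Q + (arr.length : Int) - p).toNat := by omega
        have := htmin _ h1 (by omega)
        have harg : (p + ((Q + (arr.length : Int) - p).toNat : Int))
            = Q + (arr.length : Int) * 1 := by omega
        rw [harg, PySem.Int.mod_eq_emod_of_pos hN, Int.add_mul_emod_self_left,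
          Int.emod_eq_of_lt hQ0 hQ1, hQE] at this
        exact Bool.true_eq_false.mp this
      have hwrap : (arr.length : Int) ≤ p + t := by
        by_contra hcon
        have hq_eq : PySem.Int.mod (p + t) (arr.length : Int) = p + t := by
          rw [PySem.Int.mod_eq_emod_of_pos hN]
          exact Int.emod_eq_of_lt (by omega) (by omega)
        have hqmem : (p + (t:Int)) ∈ emptiesOf arr := by
          rw [mem_emptiesOf]
          refine ⟨by omega, by omega, ?_⟩
          rw [← hq_eq]; exact htE
        have := hall _ hqmem
        omega
      have hq_eq : PySem.Int.mod (p + t) (arr.length : Int) = p + t - (arr.length : Int) := by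
        rw [PySem.Int.mod_eq_emod_of_pos hN]
        have h1 : p + (t:Int) = (p + t - (arr.length : Int)) + (arr.length : Int) * 1 := by ring
        conv_lhs => rw [h1]
        rw [Int.add_mul_emod_self_left]
        refine Int.emod_eq_of_lt (by omega) (by omega)
      have hqmem : (p + (t:Int) - (arr.length : Int)) ∈ emptiesOf arr := by
        rw [mem_emptiesOf]
        refine ⟨by omega, by omega, ?_⟩
        rw [← hq_eq]; exact htE
      have hqQ : p + (t:Int) - (arr.length : Int) = Q := by
        have h1 := hQmin _ hqmem
        omega
      have hrankQ : rankOf arr Q = 1 := by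
        rw [rankOf]
        conv_lhs => rw [hEc]
        simp only [List.filter_cons, decide_eq_true (le_refl Q), if_pos]
        have : tl.filter (fun i => decide (i ≤ Q)) = [] := by
          refine List.filter_eq_nil_iff.2 ?_
          intro x hx
          have := htl_gt x hx
          simp; omega
        simp [this]
      have hre' : rankOf arr p = (Q :: tl).length := by rw [hre, hEc]
      constructor
      · rw [hq_eq, hqQ, hre', Nat.mod_self]
        simp
      · rw [hq_eq, hqQ, hrankQ, hre', Nat.mod_self]

lemma loop_to_next (arr : List String) (k : Int) (hn : 0 < arr.length) :
    ∀ (t : Nat) (p d : Int) (fuel : Nat),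
      1 ≤ t → t ≤ fuel → -1 ≤ p → p < (arr.length : Int) → d < k →
      emptyAt arr (PySem.Int.mod (p + t) (arr.length : Int)) = true →
      (∀ s : Nat, 1 ≤ s → s < t →
        emptyAt arr (PySem.Int.mod (p + s) (arr.length : Int)) = false) →
      emptySlotLoop arr k fuel p d
        = emptySlotLoop arr k (fuel - t) (PySem.Int.mod (p + t) (arr.length : Int)) (d + 1) := by
  have hN : (0:Int) < (arr.length : Int) := by exact_mod_cast hn
  have hNe : (arr.length : Int) ≠ 0 := by omega
  intro t
  induction t with
  | zero => intro p d fuel h1; omega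
  | succ t' ih =>
    intro p d fuel h1 hf hp1 hp2 hdk htE htmin
    obtain ⟨f, rfl⟩ : ∃ f, fuel = f + 1 := ⟨fuel - 1, by omega⟩
    have hmod1 : PySem.Int.mod (p + 1) (arr.length : Int) = (p + 1) % (arr.length : Int) :=
      PySem.Int.mod_eq_emod_of_pos hN
    by_cases ht0 : t' = 0
    · subst ht0
      have hE1 : (PySem.List.pyGetD arr (PySem.Int.mod (p + 1) (arr.length : Int)) "?" == "") = true := by
        have := htE
        simp only [emptyAt] at this
        norm_num at this
        simp [this]
      simp only [emptySlotLoop, if_pos hdk]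
      rw [if_pos hE1]
      norm_num
    · have hs1 : emptyAt arr (PySem.Int.mod (p + 1) (arr.length : Int)) = false := by
        have := htmin 1 (le_refl _) (by omega)
        norm_num at this
        exact this
      simp only [emptyAt] at hs1
      have hshift : ∀ s : Nat, PySem.Int.mod (PySem.Int.mod (p + 1) (arr.length : Int) + s) (arr.length : Int)
          = PySem.Int.mod (p + (1 + s : Nat)) (arr.length : Int) := by
        intro s
        simp only [PySem.Int.mod_eq_emod_of_pos hN]
        rw [Int.emod_add_emod]
        congr 1
        push_cast
        ring
      have hrec := ih (PySem.Int.mod (p + 1) (arr.length : Int)) d f (by omega) (by omega)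
        (by rw [hmod1]; have := Int.emod_nonneg (p+1) hNe; omega)
        (by rw [hmod1]; exact Int.emod_lt_of_pos _ hN)
        hdk
        (by rw [hshift t']
            have : (1 + t' : Nat) = (t' + 1 : Nat) := by omega
            rw [this]; exact htE)
        (by intro s hs1' hs2
            rw [hshift s]
            have : (1 + s : Nat) = (s + 1 : Nat) := by omega
            rw [this]
            exact htmin (s+1) (by omega) (by omega))
      simp only [emptySlotLoop, if_pos hdk]
      rw [if_neg (by simp [hs1])]
      rw [hrec]
      have h1' : (1 + t' : Nat) = (t' + 1 : Nat) := by omega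
      rw [hshift t', h1']
      congr 1
      omega

lemma walk (arr : List String) (k : Int) (hE : emptiesOf arr ≠ []) :
    ∀ (m : Nat) (p d : Int) (fuel : Nat), 1 ≤ m → d = k - m → -1 ≤ p → p < (arr.length : Int) →
      m * arr.length < fuel →
      emptySlotLoop arr k fuel p d
        = (emptiesOf arr).getD ((rankOf arr p + m - 1) % (emptiesOf arr).length) 0 := by
  have hn := length_pos_of_emptiesOf_ne_nil hE
  have hN : (0:Int) < (arr.length : Int) := by exact_mod_cast hn
  have hNe : (arr.length : Int) ≠ 0 := by omega
  intro m
  induction m with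
  | zero => intro p d fuel h1; omega
  | succ m ih =>
    intro p d fuel h1 hd hp1 hp2 hfuel
    obtain ⟨t, ht1, htn, htE, htmin⟩ := exists_min_empty arr p hE
    have hdk : d < k := by omega
    have hmul : (m + 1) * arr.length = m * arr.length + arr.length := by ring
    have hstep := loop_to_next arr k hn t p d fuel ht1 (by omega) hp1 hp2 hdk htE htmin
    rw [hstep]
    obtain ⟨hkey1, hkey2⟩ := key_first_empty arr p t hE hp1 hp2 ht1 htE htmin
    rcases Nat.eq_zero_or_pos m with hm | hm
    · subst hm
      rw [loop_exit _ _ _ _ _ (by omega : ¬ d + 1 < k)]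
      rw [hkey1]
      norm_num
    · have hq1 : -1 ≤ PySem.Int.mod (p + t) (arr.length : Int) := by
        rw [PySem.Int.mod_eq_emod_of_pos hN]
        have := Int.emod_nonneg (p + t) hNe
        omega
      have hq2 : PySem.Int.mod (p + t) (arr.length : Int) < (arr.length : Int) := by
        rw [PySem.Int.mod_eq_emod_of_pos hN]
        exact Int.emod_lt_of_pos _ hN
      have hrec := ih (PySem.Int.mod (p + t) (arr.length : Int)) (d + 1) (fuel - t)
        (by omega) (by push_cast at hd; omega) hq1 hq2 (by omega)
      rw [hrec, hkey2]
      congr 1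
      have h2 : rankOf arr p % (emptiesOf arr).length + 1 + m - 1
          = rankOf arr p % (emptiesOf arr).length + m := by omega
      have h3 : rankOf arr p + (m + 1) - 1 = rankOf arr p + m := by omega
      rw [h2, h3, Nat.mod_add_mod]

lemma filter_length_le_of_agree_except {α : Type} [DecidableEq α] (j : α) :
    ∀ (r : List α) (p p' : α → Bool), r.Nodup → (∀ x ∈ r, x ≠ j → p x = p' x) →
      (r.filter p).length ≤ (r.filter p').length + 1 := by
  intro r p p' hnd hag
  induction r with
  | nil => simp
  | cons a t ih =>
    rcases List.nodup_cons.1 hnd with ⟨haj, hnt⟩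
    have iht := ih hnt (fun x hx hxj => hag x (List.mem_cons_of_mem a hx) hxj)
    by_cases haj' : a = j
    · have hteq : t.filter p = t.filter p' := by
        refine List.filter_congr ?_
        intro x hx
        refine hag x (List.mem_cons_of_mem a hx) ?_
        intro hxx; subst hxx; subst haj'; exact haj hx
      simp only [List.filter_cons]
      split_ifs <;> · simp [hteq]; try omega
    · have := hag a (List.mem_cons_self) haj'
      simp only [List.filter_cons, this]
      split_ifs <;> simp_all

lemma emptiesOf_set_length (arr : List String) (q : Int) (card : String)
    (hq0 : 0 ≤ q) (_hq1 : q < (arr.length : Int)) :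
    (emptiesOf arr).length ≤ (emptiesOf (PySem.List.pySetD arr q card)).length + 1 := by
  unfold emptiesOf
  rw [PySem.List.length_pySetD]
  refine filter_length_le_of_agree_except q (PySem.List.pyRange 0 (arr.length : Int) 1)
    _ _ (PySem.List.nodup_pyRange_one 0 (arr.length : Int)) ?_
  intro x hx hxq
  rcases (PySem.List.mem_pyRange_one).1 hx with ⟨h0, h1⟩
  rw [PySem.List.pySetD_of_nonneg _ _ hq0]
  rw [PySem.List.pyGetD_eq_getElem _ _ h0 h1]
  rw [PySem.List.pyGetD_eq_getElem _ _ h0 (by simpa using h1)]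
  rw [List.getElem_set_ne (by omega)]

lemma empty_slot_nonpos (arr : List String) (pos k : Int) (hk : ¬ 0 < k) :
    empty_slot arr pos k = pos :=
  loop_exit arr k _ pos 0 hk

lemma empty_slot_eq (arr : List String) (pos k : Int)
    (hE : emptiesOf arr ≠ []) (hp : pos = -1 ∨ (0 ≤ pos ∧ pos < (arr.length : Int)))
    (hk : 0 < k) :
    empty_slot arr pos k
      = (emptiesOf arr).getD ((rankOf arr pos + k.toNat - 1) % (emptiesOf arr).length) 0 := by
  have hn := length_pos_of_emptiesOf_ne_nil hE
  have hp1 : -1 ≤ pos := by rcases hp with rfl | ⟨h0, _⟩ <;> omega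
  have hp2 : pos < (arr.length : Int) := by
    rcases hp with rfl | ⟨_, h1⟩
    · exact_mod_cast by omega
    · exact h1
  exact walk arr k hE k.toNat pos 0 (k.toNat * arr.length + arr.length + 1)
    (by omega) (by omega) hp1 hp2 (by omega)

lemma pySetD_neg_one_eq (arr : List String) (card : String) (hn : 0 < arr.length) :
    PySem.List.pySetD arr (-1) card = arr.set (arr.length - 1) card := by
  simp only [PySem.List.pySetD, PySem.List.pySet?, PySem.List.pyIdx?]
  rw [if_neg (by omega), if_pos (by omega)]
  simp

lemma getD_mem_emptiesOf (arr : List String) (j : Nat) (hj : j < (emptiesOf arr).length) :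
    (emptiesOf arr).getD j 0 ∈ emptiesOf arr := by
  rw [List.getD_eq_getElem _ _ hj]
  exact List.getElem_mem hj

lemma step_eq (arr : List String) (pos : Int) (card : String) (k : Int)
    (hE : emptiesOf arr ≠ []) (hp : pos = -1 ∨ (0 ≤ pos ∧ pos < (arr.length : Int))) :
    stepA (arr, pos) (card, k) = stepB (arr.length : Int) (arr, pos) (card, k) := by
  have he : 0 < (emptiesOf arr).length :=
    Nat.pos_of_ne_zero (fun h => hE (List.eq_nil_of_length_eq_zero h))
  have heI : (0:Int) < ((emptiesOf arr).length : Int) := by exact_mod_cast he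
  by_cases hk : 0 < k
  · have hidx : PySem.Int.mod
        ((((emptiesOf arr).filter (fun i => decide (i ≤ pos))).length : Int) + k - 1)
        (((emptiesOf arr).length : Int))
        = (((rankOf arr pos + k.toNat - 1) % (emptiesOf arr).length : Nat) : Int) := by
      rw [PySem.Int.mod_eq_emod_of_pos heI]
      have h1 : (((emptiesOf arr).filter (fun i => decide (i ≤ pos))).length : Int) + k - 1
          = ((rankOf arr pos + k.toNat - 1 : Nat) : Int) := by
        rw [rankOf]
        omega
      rw [h1]
      exact_mod_cast (Int.natCast_emod _ _)
    unfold stepA stepB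
    simp only [if_pos hk]
    have hB : ((PySem.List.pyRange 0 (arr.length : Int) 1).filter
        (fun i => PySem.List.pyGetD arr i "?" == "")) = emptiesOf arr := rfl
    simp only [hB]
    rw [hidx, PySem.List.pyGetD_natCast, empty_slot_eq arr pos k hE hp hk]
  · unfold stepA stepB
    simp only [if_neg hk]
    rw [empty_slot_nonpos arr pos k hk]

lemma stepA_facts (arr : List String) (pos : Int) (card : String) (k : Int)
    (hE : emptiesOf arr ≠ []) (hp : pos = -1 ∨ (0 ≤ pos ∧ pos < (arr.length : Int))) :
    (stepA (arr, pos) (card, k)).1.length = arr.length ∧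
    ((stepA (arr, pos) (card, k)).2 = -1 ∨
      (0 ≤ (stepA (arr, pos) (card, k)).2 ∧ (stepA (arr, pos) (card, k)).2 < (arr.length : Int))) ∧
    (emptiesOf arr).length ≤ (emptiesOf (stepA (arr, pos) (card, k)).1).length + 1 := by
  have hn := length_pos_of_emptiesOf_ne_nil hE
  have he : 0 < (emptiesOf arr).length :=
    Nat.pos_of_ne_zero (fun h => hE (List.eq_nil_of_length_eq_zero h))
  unfold stepA
  simp only []
  refine ⟨PySem.List.length_pySetD _ _ _, ?_, ?_⟩
  · by_cases hk : 0 < k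
    · rw [empty_slot_eq arr pos k hE hp hk]
      right
      have hmem := getD_mem_emptiesOf arr ((rankOf arr pos + k.toNat - 1) % (emptiesOf arr).length)
        (Nat.mod_lt _ he)
      rcases (mem_emptiesOf arr _).1 hmem with ⟨h0, h1, _⟩
      exact ⟨h0, h1⟩
    · rw [empty_slot_nonpos arr pos k hk]
      exact hp
  · by_cases hk : 0 < k
    · rw [empty_slot_eq arr pos k hE hp hk]
      have hmem := getD_mem_emptiesOf arr ((rankOf arr pos + k.toNat - 1) % (emptiesOf arr).length)
        (Nat.mod_lt _ he)
      rcases (mem_emptiesOf arr _).1 hmem with ⟨h0, h1, _⟩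
      exact emptiesOf_set_length arr _ card h0 h1
    · rw [empty_slot_nonpos arr pos k hk]
      rcases hp with rfl | ⟨h0, h1⟩
      · rw [pySetD_neg_one_eq arr card hn]
        have h2 := emptiesOf_set_length arr ((arr.length : Int) - 1) card (by omega) (by omega)
        rw [PySem.List.pySetD_of_nonneg _ _ (by omega)] at h2
        have h3 : ((arr.length : Int) - 1).toNat = arr.length - 1 := by omega
        rwa [h3] at h2
      · exact emptiesOf_set_length arr pos card h0 h1

lemma fold_eq (n : Int) :
    ∀ (l : List (String × Int)) (arr : List String) (pos : Int),
      n = (arr.length : Int) → (pos = -1 ∨ (0 ≤ pos ∧ pos < (arr.length : Int))) →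
      l.length ≤ (emptiesOf arr).length →
      l.foldl stepA (arr, pos) = l.foldl (stepB n) (arr, pos) := by
  intro l
  induction l with
  | nil => intro arr pos _ _ _; rfl
  | cons c cl ih =>
    intro arr pos hn' hp hlen
    have hE : emptiesOf arr ≠ [] := by
      intro h
      rw [h] at hlen
      simp at hlen
    obtain ⟨card, k⟩ := c
    simp only [List.foldl_cons]
    rw [hn', ← step_eq arr pos card k hE hp]
    obtain ⟨hf1, hf2, hf3⟩ := stepA_facts arr pos card k hE hp
    have hnext : stepA (arr, pos) (card, k)
        = ((stepA (arr, pos) (card, k)).1, (stepA (arr, pos) (card, k)).2) := rfl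
    rw [hnext]
    rw [← hn']
    refine ih _ _ (by rw [hn', hf1]) (by rw [hf1]; exact hf2) ?_
    have : (cl.length + 1 : Nat) ≤ (emptiesOf arr).length := by simpa using hlen
    omega

lemma emptiesOf_replicate (N : Nat) :
    emptiesOf (List.replicate N "") = PySem.List.pyRange 0 (N : Int) 1 := by
  unfold emptiesOf
  rw [List.length_replicate]
  refine List.filter_eq_self.2 ?_
  intro i hi
  rcases (PySem.List.mem_pyRange_one).1 hi with ⟨h0, h1⟩
  have : PySem.List.pyGetD (List.replicate N "") i "?" = "" := by
    have h2 : i < ((List.replicate N ("" : String)).length : Int) := by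
      rw [List.length_replicate]; exact h1
    rw [PySem.List.pyGetD_eq_getElem _ _ h0 h2]
    simp
  simp [this]

-- ===== VERDICT (by name: the statement is the Claim_ definition above) =====
theorem arrange_cards_spec : Claim_equal_arrange_cards := by
  intro ordering _
  unfold Spec_arrange_cards
  rw [arrange_cards_eq_fold, arrange_cards_alt_eq_fold]
  have h := fold_eq (ordering.length : Int) ordering (List.replicate ordering.length "") (-1)
    (by simp) (Or.inl rfl)
    (by rw [emptiesOf_replicate]; simp [PySem.List.length_pyRange_one])
  rw [h]
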